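-- pv_equiv track=rewrite | github.com/SamlKeller/CS | Python/Unit 3/Red/red1.py | either35
-- ===== SOURCE A (Python) =====
-- def either35 (ls):
--     lastElm = ''
--     threeFive = False
--     fiveThree = False
--     for elm in ls:
--         if (elm == 5):
--             if (lastElm == 5):
--                 threeFive = True
--         elif (elm == 3):
--             if (lastElm == 3):
--                 fiveThree = True
--         lastElm = elm
--     return (fiveThree or threeFive) and ((fiveThree == False) or (threeFive == False))
-- ===== SOURCE B (Python) =====
-- def either35(ls):
--     def adjacent_run(v):
--         idx = [i for i, x in enumerate(ls) if x == v]
--         return any(j - i == 1 for i, j in zip(idx, idx[1:]))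
--     return adjacent_run(5) != adjacent_run(3)
-- ===== Notes on version B (the rewrite author's own statement) =====
-- stated objective: alternative
-- what changed: Instead of A's stateful scan over the values (lastElm plus two mutating flags), B first builds the index lists of the occurrences of 5 and of 3 and then decides adjacency purely on the index gaps (two consecutive occurrence indices differing by 1), combining the two results with != (the XOR A's final expression encodes).
import Mathlib
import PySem

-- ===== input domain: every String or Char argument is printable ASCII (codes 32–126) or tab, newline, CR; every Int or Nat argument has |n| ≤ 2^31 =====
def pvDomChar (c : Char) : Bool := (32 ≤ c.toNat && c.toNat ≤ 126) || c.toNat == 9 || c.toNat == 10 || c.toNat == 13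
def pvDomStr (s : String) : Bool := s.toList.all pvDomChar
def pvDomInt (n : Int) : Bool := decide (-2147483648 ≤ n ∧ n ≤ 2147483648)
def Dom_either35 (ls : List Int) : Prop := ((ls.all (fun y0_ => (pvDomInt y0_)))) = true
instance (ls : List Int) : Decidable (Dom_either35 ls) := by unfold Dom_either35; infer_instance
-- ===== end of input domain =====

-- B replaces A's stateful value scan (lastElm + two mutating flags) by an occurrence-index
-- computation: collect the indices of 5 and of 3 and test whether two consecutive occurrence
-- indices differ by 1, XOR-combined with != ; objective: alternative.

-- ===== PORT A =====
-- state: (lastElm, threeFive, fiveThree); Python's initial lastElm = '' never equals an int, modelled as none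
def either35 (ls : List Int) : Bool :=
  let s := ls.foldl (fun (st : Option Int × Bool × Bool) elm =>
    if elm = 5 then
      (some elm, (if st.1 = some 5 then true else st.2.1), st.2.2)
    else if elm = 3 then
      (some elm, st.2.1, (if st.1 = some 3 then true else st.2.2))
    else
      (some elm, st.2.1, st.2.2)) (none, false, false)
  (s.2.2 || s.2.1) && (decide (s.2.2 = false) || decide (s.2.1 = false))

-- ===== PORT B =====
-- inner helper adjacent_run(v): indices of v, then any gap of exactly 1 between consecutive indices
def either35AdjacentRun (ls : List Int) (v : Int) : Bool :=
  let idx : List Int := ((PySem.List.enumerate ls).filter (fun p => decide (p.2 = v))).map (fun p => p.1)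
  (idx.zip (idx.drop 1)).any (fun p => decide (p.2 - p.1 = 1))

def either35_alt (ls : List Int) : Bool :=
  either35AdjacentRun ls 5 != either35AdjacentRun ls 3

-- ===== PRECONDITION & SPEC =====
def Spec_either35 (ls : List Int) (out : Bool) : Prop := out = either35_alt ls
instance (ls : List Int) (out : Bool) : Decidable (Spec_either35 ls out) := by unfold Spec_either35; infer_instance

-- ===== CLAIM (what is proved, stated in full; the proofs are below) =====
def Claim_equal_either35 : Prop := ∀ (ls : List Int), Dom_either35 ls → Spec_either35 ls (either35 ls)

-- ===== LEMMAS AND PROOFS =====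

-- A-side adjacency flag as a recursive function of (previous element, rest), one per value v
def hAdj (v : Int) (last : Option Int) : List Int → Bool
  | [] => false
  | x :: xs => (decide (x = v) && decide (last = some v)) || hAdj v (some x) xs

lemma fold_inv (ls : List Int) : ∀ (last : Option Int) (t f : Bool),
    (ls.foldl (fun (st : Option Int × Bool × Bool) elm =>
      if elm = 5 then
        (some elm, (if st.1 = some 5 then true else st.2.1), st.2.2)
      else if elm = 3 then
        (some elm, st.2.1, (if st.1 = some 3 then true else st.2.2))
      else
        (some elm, st.2.1, st.2.2)) (last, t, f)).2
    = (t || hAdj 5 last ls, f || hAdj 3 last ls) := by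
  induction ls with
  | nil => intro last t f; simp [hAdj]
  | cons x xs ih =>
    intro last t f
    simp only [List.foldl_cons]
    by_cases h5x : x = 5
    · subst h5x
      simp only [ih, hAdj]
      by_cases hl : last = some 5 <;> simp [hl]
    · by_cases h3x : x = 3
      · subst h3x
        simp only [if_neg (by decide : ¬(3:Int) = 5), ih, hAdj]
        by_cases hl : last = some 3 <;> simp [hl]
      · rw [if_neg h5x, if_neg h3x, ih]
        simp [hAdj, h5x, h3x]

-- B-side: index list of occurrences of v starting at offset n
def idxFrom (v : Int) : Int → List Int → List Int
  | _, [] => []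
  | n, x :: xs => if x = v then n :: idxFrom v (n+1) xs else idxFrom v (n+1) xs

lemma enum_filter_map (v : Int) (ls : List Int) : ∀ (n : Int),
    ((PySem.List.enumerate ls n).filter (fun p => decide (p.2 = v))).map (fun p => p.1)
      = idxFrom v n ls := by
  induction ls with
  | nil => intro n; simp [PySem.List.enumerate_nil, idxFrom]
  | cons x xs ih =>
    intro n
    simp only [PySem.List.enumerate_cons, List.filter_cons, idxFrom]
    by_cases hx : x = v <;> simp [hx, ih]

-- chain view of the zip-any pair test
def chk : List Int → Bool
  | [] => false
  | [_] => false
  | i :: j :: rest => decide (j - i = 1) || chk (j :: rest)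

lemma zipany_eq_chk (l : List Int) :
    (l.zip (l.drop 1)).any (fun p => decide (p.2 - p.1 = 1)) = chk l := by
  induction l with
  | nil => simp [chk]
  | cons i rest ih =>
    cases rest with
    | nil => simp [chk]
    | cons j r => simp [chk, ← ih]

lemma idxFrom_lb (v : Int) (ls : List Int) : ∀ (n k : Int), k ∈ idxFrom v n ls → n ≤ k := by
  induction ls with
  | nil => intro n k h; simp [idxFrom] at h
  | cons x xs ih =>
    intro n k h
    simp only [idxFrom] at h
    by_cases hx : x = v
    · rw [if_pos hx] at h
      rcases List.mem_cons.1 h with h | h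
      · omega
      · have := ih (n+1) k h; omega
    · rw [if_neg hx] at h
      have := ih (n+1) k h; omega

-- skipping a head index whose successor (if any) is at least 2 away does not change chk
lemma chk_cons_far (n : Int) (l : List Int) (hl : ∀ k ∈ l, n + 2 ≤ k) :
    chk (n :: l) = chk l := by
  cases l with
  | nil => simp [chk]
  | cons j r =>
    have hj : n + 2 ≤ j := hl j (List.mem_cons_self ..)
    simp [chk]
    omega

lemma hAdj_none_of_ne (v x : Int) (hx : x ≠ v) (xs : List Int) :
    hAdj v (some x) xs = hAdj v none xs := by
  cases xs with
  | nil => rfl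
  | cons y ys => simp [hAdj, hx]

lemma chk_idxFrom (v : Int) (ls : List Int) : ∀ (n : Int),
    chk (idxFrom v n ls) = hAdj v none ls := by
  induction ls with
  | nil => intro n; simp [idxFrom, chk, hAdj]
  | cons x xs ih =>
    intro n
    by_cases hx : x = v
    · subst hx
      rw [show idxFrom x n (x :: xs) = n :: idxFrom x (n+1) xs from by simp [idxFrom]]
      cases xs with
      | nil => simp [idxFrom, chk, hAdj]
      | cons y ys =>
        by_cases hy : y = x
        · subst hy
          simp [idxFrom, chk, hAdj]
        · have hfar : ∀ k ∈ idxFrom x (n+1) (y :: ys), n + 2 ≤ k := by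
            intro k hk
            simp only [idxFrom, if_neg hy] at hk
            have := idxFrom_lb x ys (n+1+1) k hk
            omega
          rw [chk_cons_far n _ hfar, ih (n+1)]
          simp [hAdj, hy, hAdj_none_of_ne x y hy]
    · simp only [idxFrom, if_neg hx]
      rw [ih (n+1)]
      simp [hAdj, hx, hAdj_none_of_ne v x hx]

lemma adjacentRun_eq (ls : List Int) (v : Int) :
    either35AdjacentRun ls v = hAdj v none ls := by
  unfold either35AdjacentRun
  rw [enum_filter_map, zipany_eq_chk, chk_idxFrom]

lemma xor_form (a b : Bool) : ((a || b) && (decide (a = false) || decide (b = false))) = (b != a) := by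
  cases a <;> cases b <;> decide

-- ===== VERDICT (by name: the statement is the Claim_ definition above) =====
theorem either35_spec : Claim_equal_either35 := by
  intro ls _
  unfold Spec_either35 either35 either35_alt
  simp only [fold_inv, Bool.false_or, adjacentRun_eq]
  exact xor_form _ _
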